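-- pv_equiv track=rewrite | github.com/KCP1023/Movie-Recommender-System | tfidf_retrieval.py | find_movie_index
-- ===== SOURCE A (Python) =====
-- def find_movie_index(movies, seed_title):
--     seed_title_lower = seed_title.strip().lower()
--
--     exact_matches = [
--         idx for idx, movie in enumerate(movies) if (movie.get("title", "").strip().lower() == seed_title_lower)
--     ]
--     if exact_matches:
--         return exact_matches[0]
--
--     partial_matches = [
--         idx for idx, movie in enumerate(movies) if seed_title_lower in movie.get("title", "").strip().lower()
--     ]
--     if partial_matches:
--         return partial_matches[0]
--
--     raise ValueError(f"couldn't find a movie title matching '{seed_title}'.")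
-- ===== SOURCE B (Python) =====
-- def find_movie_index(movies, seed_title):
--     seed_title_lower = seed_title.strip().lower()
--     first_partial = None
--     for idx, movie in enumerate(movies):
--         t = movie.get("title", "").strip().lower()
--         if t == seed_title_lower:
--             return idx
--         if first_partial is None and seed_title_lower in t:
--             first_partial = idx
--     if first_partial is not None:
--         return first_partial
--     raise ValueError(f"couldn't find a movie title matching '{seed_title}'.")
-- ===== Notes on version B (the rewrite author's own statement) =====
-- stated objective: simpler
-- what changed: Replaces A's two full list-building comprehension passes (all exact matches, then all partial matches) with a single traversal that returns immediately on the first exact match and keeps one first-partial candidate for the fallback.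
import Mathlib
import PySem

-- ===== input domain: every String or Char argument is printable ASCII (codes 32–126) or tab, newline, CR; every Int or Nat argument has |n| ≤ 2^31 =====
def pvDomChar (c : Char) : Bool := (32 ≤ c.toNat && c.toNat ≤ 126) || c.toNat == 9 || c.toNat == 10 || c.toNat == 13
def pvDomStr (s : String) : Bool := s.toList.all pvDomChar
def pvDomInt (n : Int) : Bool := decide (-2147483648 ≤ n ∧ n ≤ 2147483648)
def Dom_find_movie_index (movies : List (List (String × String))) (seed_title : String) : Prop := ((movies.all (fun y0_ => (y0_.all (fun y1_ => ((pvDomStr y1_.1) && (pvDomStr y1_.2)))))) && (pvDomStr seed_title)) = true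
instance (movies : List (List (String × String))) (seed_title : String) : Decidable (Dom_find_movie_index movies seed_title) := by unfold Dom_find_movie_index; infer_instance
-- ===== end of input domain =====

-- B replaces A's two full filtering passes by one short-circuiting traversal that keeps a single
-- first-partial candidate (objective: alternative/simpler single pass; return-value equivalence only).

-- shared tiny helper: movie.get("title", "").strip().lower()
def pvNorm (m : List (String × String)) : String :=
  PySem.Str.lower (PySem.Str.strip ((PySem.Dict.mk m).getD "title" ""))

-- ===== PORT A =====
def find_movie_index (movies : List (List (String × String))) (seed_title : String) : Int :=
  let seed_title_lower := PySem.Str.lower (PySem.Str.strip seed_title)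
  let exact_matches :=
    ((PySem.List.enumerate movies).filter (fun p => pvNorm p.2 == seed_title_lower)).map (fun p => p.1)
  match exact_matches with
  | i :: _ => i
  | [] =>
    let partial_matches :=
      ((PySem.List.enumerate movies).filter (fun p => PySem.Str.isIn seed_title_lower (pvNorm p.2))).map (fun p => p.1)
    match partial_matches with
    | i :: _ => i
    | [] => -1  -- Python raises ValueError here; excluded by Pre_

-- ===== PORT B =====
def pvLoopB (s : String) : List (Int × List (String × String)) → Option Int → Int
  | [], first_partial =>
    match first_partial with
    | some i => i
    | none => -1  -- Python raises ValueError here; excluded by Pre_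
  | (idx, movie) :: rest, first_partial =>
    let t := pvNorm movie
    if t == s then idx
    else pvLoopB s rest
      (if first_partial.isNone && PySem.Str.isIn s t then some idx else first_partial)

def find_movie_index_alt (movies : List (List (String × String))) (seed_title : String) : Int :=
  pvLoopB (PySem.Str.lower (PySem.Str.strip seed_title)) (PySem.List.enumerate movies) none

-- ===== PRECONDITION & SPEC =====
-- Pre_ excludes exactly the inputs where no title contains the normalised seed, on which A raises ValueError.
def Pre_find_movie_index (movies : List (List (String × String))) (seed_title : String) : Prop :=
  ∃ m ∈ movies, PySem.Str.isIn (PySem.Str.lower (PySem.Str.strip seed_title)) (pvNorm m) = true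
instance (movies : List (List (String × String))) (seed_title : String) : Decidable (Pre_find_movie_index movies seed_title) := by unfold Pre_find_movie_index; infer_instance

def pvWitness_find_movie_index : (List (List (String × String))) × String :=
  ([[("title", " The Matrix ")], [("genre", "x")]], "matrix")

def Spec_find_movie_index (movies : List (List (String × String))) (seed_title : String) (out : Int) : Prop := out = find_movie_index_alt movies seed_title
instance (movies : List (List (String × String))) (seed_title : String) (out : Int) : Decidable (Spec_find_movie_index movies seed_title out) := by unfold Spec_find_movie_index; infer_instance

-- ===== CLAIM (what is proved, stated in full; the proofs are below) =====
def Claim_equal_find_movie_index : Prop := ∀ (movies : List (List (String × String))) (seed_title : String), Dom_find_movie_index movies seed_title → Pre_find_movie_index movies seed_title → Spec_find_movie_index movies seed_title (find_movie_index movies seed_title)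

-- ===== LEMMAS AND PROOFS =====

-- pvLoopB described by A's two-filter shape, for any pair list and pending candidate.
theorem pvLoopB_eq (s : String) (l : List (Int × List (String × String))) (fp : Option Int) :
    pvLoopB s l fp =
      match (l.filter (fun p => pvNorm p.2 == s)).map (fun p => p.1) with
      | i :: _ => i
      | [] =>
        match fp with
        | some j => j
        | none =>
          match (l.filter (fun p => PySem.Str.isIn s (pvNorm p.2))).map (fun p => p.1) with
          | i :: _ => i
          | [] => -1 := by
  induction l generalizing fp with
  | nil => cases fp <;> rfl
  | cons hd tl ih =>
    obtain ⟨idx, movie⟩ := hd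
    by_cases hx : pvNorm movie == s
    · simp [pvLoopB, hx]
    · have hne : (pvNorm movie == s) = false := by simp_all
      rw [pvLoopB]
      simp only [hne, List.filter_cons, Bool.false_eq_true, if_false]
      rw [ih]
      cases fp with
      | some j => simp
      | none =>
        by_cases hp : PySem.Chars.isIn s.toList (pvNorm movie).toList = true
        · simp [hp]
        · simp [hp]

-- ===== VERDICT (by name: the statement is the Claim_ definition above) =====
theorem find_movie_index_spec : Claim_equal_find_movie_index := by
  intro movies seed_title _ _
  unfold Spec_find_movie_index find_movie_index find_movie_index_alt
  rw [pvLoopB_eq]
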